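-- pv_equiv track=rewrite | github.com/lyuzicheng/Re-2Math | code/evaluation/end_to_end_eval.py | is_probable_html
-- ===== SOURCE A (Python) =====
-- def is_probable_html(text: str) -> bool:
--     lowered = (text or "").lower()
--     anti_bot_markers = [
--         "<html",
--         "<!doctype html",
--         "captcha",
--         "cloudflare",
--         "access denied",
--         "enable javascript",
--         "robot check",
--     ]
--     return any(marker in lowered for marker in anti_bot_markers)
-- ===== SOURCE B (Python) =====
-- def is_probable_html(text: str) -> bool:
--     lowered = (text or "").lower()
--     markers = (
--         "<html",
--         "<!doctype html",
--         "captcha",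
--         "cloudflare",
--         "access denied",
--         "enable javascript",
--         "robot check",
--     )
--     # single combined pass over positions instead of 7 separate substring scans
--     return any(lowered.startswith(m, i) for i in range(len(lowered) + 1) for m in markers)
-- ===== Notes on version B (the rewrite author's own statement) =====
-- stated objective: alternative
-- what changed: Replaces seven independent per-marker substring-containment scans with a single position-major pass over the lowered text that checks at each index whether any marker starts there, short-circuiting on the first hit.
import Mathlib
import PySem

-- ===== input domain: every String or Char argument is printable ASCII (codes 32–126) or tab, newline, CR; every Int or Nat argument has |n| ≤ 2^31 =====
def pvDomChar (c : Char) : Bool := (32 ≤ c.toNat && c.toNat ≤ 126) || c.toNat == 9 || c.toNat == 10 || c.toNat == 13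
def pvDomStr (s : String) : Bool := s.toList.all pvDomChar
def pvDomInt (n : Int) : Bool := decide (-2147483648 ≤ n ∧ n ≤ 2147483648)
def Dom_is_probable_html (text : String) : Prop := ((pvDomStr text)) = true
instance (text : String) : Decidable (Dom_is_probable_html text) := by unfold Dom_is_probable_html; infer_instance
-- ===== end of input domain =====

-- B replaces A's seven independent substring scans with one position-major pass that
-- checks at each index whether any marker starts there (objective: alternative).

-- ===== PORT A =====
def pvMarkers : List String :=
  ["<html", "<!doctype html", "captcha", "cloudflare", "access denied",
   "enable javascript", "robot check"]

def is_probable_html (text : String) : Bool :=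
  let lowered := PySem.Str.lower (if text = "" then "" else text)
  pvMarkers.any (fun marker => PySem.Str.isIn marker lowered)

-- ===== PORT B =====
-- the same seven markers, as char lists (B checks startswith at each position)
def pvMarkersB : List (List Char) :=
  pvMarkers.map String.toList

-- 'any(lowered.startswith(m, i) for i in range(len+1) for m in markers)':
-- recursion over the suffixes of lowered = the loop over positions i.
def pvScan (markers : List (List Char)) : List Char → Bool
  | [] => markers.any (fun m => m.isPrefixOf [])
  | c :: t => markers.any (fun m => m.isPrefixOf (c :: t)) || pvScan markers t

def is_probable_html_alt (text : String) : Bool :=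
  let lowered := PySem.Str.lower (if text = "" then "" else text)
  pvScan pvMarkersB lowered.toList

-- ===== PRECONDITION & SPEC =====
def Spec_is_probable_html (text : String) (out : Bool) : Prop := out = is_probable_html_alt text
instance (text : String) (out : Bool) : Decidable (Spec_is_probable_html text out) := by unfold Spec_is_probable_html; infer_instance

-- ===== CLAIM (what is proved, stated in full; the proofs are below) =====
def Claim_equal_is_probable_html : Prop := ∀ (text : String), Dom_is_probable_html text → Spec_is_probable_html text (is_probable_html text)

-- ===== LEMMAS AND PROOFS =====

-- B's position scan finds a hit iff some marker is an infix of the text.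
theorem pvScan_iff (markers : List (List Char)) (l : List Char) :
    pvScan markers l = true ↔ ∃ m ∈ markers, m <:+: l := by
  induction l with
  | nil =>
    simp [pvScan, List.any_eq_true, List.isPrefixOf_iff_prefix]
  | cons c t ih =>
    simp only [pvScan, Bool.or_eq_true, List.any_eq_true, ih]
    constructor
    · rintro (⟨m, hm, hp⟩ | ⟨m, hm, hi⟩)
      · exact ⟨m, hm, ((List.isPrefixOf_iff_prefix).1 hp).isInfix⟩
      · exact ⟨m, hm, (List.infix_cons_iff).2 (Or.inr hi)⟩
    · rintro ⟨m, hm, hi⟩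
      rcases (List.infix_cons_iff).1 hi with hp | hi
      · exact Or.inl ⟨m, hm, (List.isPrefixOf_iff_prefix).2 hp⟩
      · exact Or.inr ⟨m, hm, hi⟩

-- ===== VERDICT (by name: the statement is the Claim_ definition above) =====
theorem is_probable_html_spec : Claim_equal_is_probable_html := by
  intro text _
  unfold Spec_is_probable_html is_probable_html is_probable_html_alt
  set lowered := PySem.Str.lower (if text = "" then "" else text) with hl
  rw [Bool.eq_iff_iff, List.any_eq_true, pvScan_iff]
  constructor
  · rintro ⟨m, hm, hin⟩
    exact ⟨m.toList, by simp [pvMarkersB]; exact ⟨m, hm, rfl⟩,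
      (PySem.Str.isIn_iff_infix m lowered).1 hin⟩
  · rintro ⟨ml, hml, hi⟩
    simp only [pvMarkersB, List.mem_map] at hml
    obtain ⟨m, hm, rfl⟩ := hml
    exact ⟨m, hm, (PySem.Str.isIn_iff_infix m lowered).2 hi⟩
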